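-- pv_equiv track=rewrite | github.com/andywaltlova/advent-of-code-2023 | 02.py | part_one
-- ===== SOURCE A (Python) =====
-- def part_one(dict_of_games: dict[int, list[dict[str,int]]]):
--     cubes_input = {
--         'red':12,
--         'green': 13,
--         'blue': 14,
--     }
--     id_sum = 0
--     for game_id, sets in dict_of_games.items():
--         # Oh look this could be one pretty long list comprehension ...
--         all_sets_possible = all(
--             [all([cube_set.get(color,0) <= num for color, num in cubes_input.items()])
--              for cube_set in sets]
--         )
--         if all_sets_possible:
--             id_sum += game_id
--     return id_sum
-- ===== SOURCE B (Python) =====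
-- def part_one(dict_of_games):
--     # One aggregation pass per game: fold all cube sets into the maximum count
--     # seen per color, then compare those maxima against the 12/13/14 limits.
--     total = 0
--     for game_id, sets in dict_of_games.items():
--         r = g = b = 0
--         for cube_set in sets:
--             for color, n in cube_set.items():
--                 if color == 'red' and n > r:
--                     r = n
--                 elif color == 'green' and n > g:
--                     g = n
--                 elif color == 'blue' and n > b:
--                     b = n
--         if r <= 12 and g <= 13 and b <= 14:
--             total += game_id
--     return total
-- ===== Notes on version B (the rewrite author's own statement) =====
-- stated objective: alternative
-- what changed: Replaces the per-set nested all()-of-all() test (three dict lookups and two intermediate list builds per set) with a single aggregation pass that folds every cube-set entry into running per-color maxima compared once per game against the 12/13/14 limits.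
import Mathlib
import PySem

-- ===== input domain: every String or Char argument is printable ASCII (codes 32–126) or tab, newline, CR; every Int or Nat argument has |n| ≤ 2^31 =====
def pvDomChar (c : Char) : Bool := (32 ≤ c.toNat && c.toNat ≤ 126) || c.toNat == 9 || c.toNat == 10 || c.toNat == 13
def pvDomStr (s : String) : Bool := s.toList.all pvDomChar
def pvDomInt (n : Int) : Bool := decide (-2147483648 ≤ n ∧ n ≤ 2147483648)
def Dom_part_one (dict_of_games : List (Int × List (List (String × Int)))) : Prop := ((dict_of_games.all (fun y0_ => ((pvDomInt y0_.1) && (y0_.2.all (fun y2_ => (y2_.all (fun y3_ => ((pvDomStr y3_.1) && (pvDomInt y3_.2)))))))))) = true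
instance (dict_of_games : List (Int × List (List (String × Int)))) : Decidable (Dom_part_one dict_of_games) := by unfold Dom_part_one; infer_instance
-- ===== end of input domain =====

-- B replaces A's per-set nested all()-of-all() test with one aggregation pass computing
-- per-color maxima that are then compared against the 12/13/14 limits (objective: alternative).


-- ===== PORT A =====
-- cube_set.get(color, 0): first-match association-list lookup with default 0
def lookupD0 (s : List (String × Int)) (c : String) : Int :=
  match s with
  | [] => 0
  | (k, v) :: rest => if k == c then v else lookupD0 rest c

def part_one (dict_of_games : List (Int × List (List (String × Int)))) : Int :=
  let cubes_input : List (String × Int) := [("red", 12), ("green", 13), ("blue", 14)]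
  dict_of_games.foldl
    (fun id_sum p =>
      let all_sets_possible :=
        p.2.all (fun cube_set =>
          cubes_input.all (fun cn => decide (lookupD0 cube_set cn.1 ≤ cn.2)))
      if all_sets_possible then id_sum + p.1 else id_sum)
    0

-- ===== PORT B =====
-- fold one cube-set entry into the running (red, green, blue) maxima
def updMax (st : Int × Int × Int) (kv : String × Int) : Int × Int × Int :=
  if kv.1 == "red" && decide (kv.2 > st.1) then (kv.2, st.2.1, st.2.2)
  else if kv.1 == "green" && decide (kv.2 > st.2.1) then (st.1, kv.2, st.2.2)
  else if kv.1 == "blue" && decide (kv.2 > st.2.2) then (st.1, st.2.1, kv.2)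
  else st

def part_one_alt (dict_of_games : List (Int × List (List (String × Int)))) : Int :=
  dict_of_games.foldl
    (fun total p =>
      let m := p.2.foldl (fun st cube_set => cube_set.foldl updMax st) (0, 0, 0)
      if m.1 ≤ 12 ∧ m.2.1 ≤ 13 ∧ m.2.2 ≤ 14 then total + p.1 else total)
    0

-- ===== PRECONDITION & SPEC =====
-- Pre_ excludes association lists with duplicate game ids or a duplicate color key inside a
-- cube set: such lists do not correspond to any Python dict A receives (dict construction
-- collapses duplicate keys), so the assoc-list behaviour there is nobody's specification.
def Pre_part_one (dict_of_games : List (Int × List (List (String × Int)))) : Prop :=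
  (dict_of_games.map Prod.fst).Nodup ∧
  ∀ p ∈ dict_of_games, ∀ s ∈ p.2, (s.map Prod.fst).Nodup
instance (dict_of_games : List (Int × List (List (String × Int)))) : Decidable (Pre_part_one dict_of_games) := by unfold Pre_part_one; infer_instance

def pvWitness_part_one : (List (Int × List (List (String × Int)))) :=
  [(1, [[("red", 4), ("blue", 3)], [("green", 2)]]), (2, [[("red", 20)]]), (3, [])]

def Spec_part_one (dict_of_games : List (Int × List (List (String × Int)))) (out : Int) : Prop := out = part_one_alt dict_of_games
instance (dict_of_games : List (Int × List (List (String × Int)))) (out : Int) : Decidable (Spec_part_one dict_of_games out) := by unfold Spec_part_one; infer_instance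

-- ===== CLAIM (what is proved, stated in full; the proofs are below) =====
def Claim_equal_part_one : Prop := ∀ (dict_of_games : List (Int × List (List (String × Int)))), Dom_part_one dict_of_games → Pre_part_one dict_of_games → Spec_part_one dict_of_games (part_one dict_of_games)

-- ===== LEMMAS AND PROOFS =====

theorem updMax_red (st : Int × Int × Int) (v : Int) :
    updMax st ("red", v) = (max st.1 v, st.2.1, st.2.2) := by
  simp only [updMax]
  by_cases h : v > st.1
  · rw [if_pos (by simp [h])]
    simp [max_eq_right (le_of_lt h)]
  · rw [if_neg (by simp [h]), if_neg (by simp), if_neg (by simp)]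
    simp [max_eq_left (by omega : v ≤ st.1)]

theorem updMax_green (st : Int × Int × Int) (v : Int) :
    updMax st ("green", v) = (st.1, max st.2.1 v, st.2.2) := by
  simp only [updMax]
  rw [if_neg (by simp)]
  by_cases h : v > st.2.1
  · rw [if_pos (by simp [h])]
    simp [max_eq_right (le_of_lt h)]
  · rw [if_neg (by simp [h]), if_neg (by simp)]
    simp [max_eq_left (by omega : v ≤ st.2.1)]

theorem updMax_blue (st : Int × Int × Int) (v : Int) :
    updMax st ("blue", v) = (st.1, st.2.1, max st.2.2 v) := by
  simp only [updMax]
  rw [if_neg (by simp), if_neg (by simp)]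
  by_cases h : v > st.2.2
  · rw [if_pos (by simp [h])]
    simp [max_eq_right (le_of_lt h)]
  · rw [if_neg (by simp [h])]
    simp [max_eq_left (by omega : v ≤ st.2.2)]

theorem updMax_other (st : Int × Int × Int) (k : String) (v : Int)
    (hr : k ≠ "red") (hg : k ≠ "green") (hb : k ≠ "blue") :
    updMax st (k, v) = st := by
  simp only [updMax]
  rw [if_neg (by simp [hr]), if_neg (by simp [hg]), if_neg (by simp [hb])]

theorem lookupD0_of_not_mem (s : List (String × Int)) (c : String)
    (h : c ∉ s.map Prod.fst) : lookupD0 s c = 0 := by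
  induction s with
  | nil => rfl
  | cons kv rest ih =>
    simp only [List.map_cons, List.mem_cons, not_or] at h
    simp only [lookupD0]
    rw [if_neg (by simpa [beq_iff_eq] using (Ne.symm h.1)), ih h.2]

-- one cube set folds to the componentwise max with its three lookups
theorem foldl_updMax_set (s : List (String × Int)) (st : Int × Int × Int)
    (hnd : (s.map Prod.fst).Nodup)
    (h0 : 0 ≤ st.1 ∧ 0 ≤ st.2.1 ∧ 0 ≤ st.2.2) :
    s.foldl updMax st =
      (max st.1 (lookupD0 s "red"), max st.2.1 (lookupD0 s "green"),
       max st.2.2 (lookupD0 s "blue")) := by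
  induction s generalizing st with
  | nil =>
    simp only [List.foldl_nil, lookupD0]
    rw [max_eq_left h0.1, max_eq_left h0.2.1, max_eq_left h0.2.2]
  | cons kv rest ih =>
    obtain ⟨k, v⟩ := kv
    simp only [List.map_cons, List.nodup_cons] at hnd
    simp only [List.foldl_cons, lookupD0]
    by_cases hr : k = "red"
    · subst hr
      rw [updMax_red, ih (max st.1 v, st.2.1, st.2.2) hnd.2
            ⟨le_trans h0.1 (le_max_left st.1 v), h0.2.1, h0.2.2⟩,
          lookupD0_of_not_mem rest "red" hnd.1]
      simp [max_eq_left (le_trans h0.1 (le_max_left st.1 v))]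
    · by_cases hg : k = "green"
      · subst hg
        rw [updMax_green, ih (st.1, max st.2.1 v, st.2.2) hnd.2
              ⟨h0.1, le_trans h0.2.1 (le_max_left st.2.1 v), h0.2.2⟩,
            lookupD0_of_not_mem rest "green" hnd.1]
        simp [max_eq_left (le_trans h0.2.1 (le_max_left st.2.1 v))]
      · by_cases hb : k = "blue"
        · subst hb
          rw [updMax_blue, ih (st.1, st.2.1, max st.2.2 v) hnd.2
                ⟨h0.1, h0.2.1, le_trans h0.2.2 (le_max_left st.2.2 v)⟩,
              lookupD0_of_not_mem rest "blue" hnd.1]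
          simp [max_eq_left (le_trans h0.2.2 (le_max_left st.2.2 v))]
        · rw [updMax_other st k v hr hg hb, ih st hnd.2 h0,
              if_neg (by simp [hr]), if_neg (by simp [hg]), if_neg (by simp [hb])]

-- the whole game folds to the three per-color maxima over its sets
theorem foldl_updMax_sets (sets : List (List (String × Int))) (st : Int × Int × Int)
    (hnd : ∀ s ∈ sets, (s.map Prod.fst).Nodup)
    (h0 : 0 ≤ st.1 ∧ 0 ≤ st.2.1 ∧ 0 ≤ st.2.2) :
    sets.foldl (fun st cube_set => cube_set.foldl updMax st) st =
      (sets.foldl (fun a s => max a (lookupD0 s "red")) st.1,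
       sets.foldl (fun a s => max a (lookupD0 s "green")) st.2.1,
       sets.foldl (fun a s => max a (lookupD0 s "blue")) st.2.2) := by
  induction sets generalizing st with
  | nil => simp
  | cons s rest ih =>
    simp only [List.foldl_cons]
    rw [foldl_updMax_set s st (hnd s (by simp)) h0]
    exact ih _ (fun t ht => hnd t (by simp [ht]))
      ⟨le_trans h0.1 (le_max_left _ _), le_trans h0.2.1 (le_max_left _ _),
       le_trans h0.2.2 (le_max_left _ _)⟩

theorem foldl_max_le {α : Type} (l : List α) (f : α → Int) (a L : Int) :
    l.foldl (fun a x => max a (f x)) a ≤ L ↔ a ≤ L ∧ ∀ x ∈ l, f x ≤ L := by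
  induction l generalizing a with
  | nil => simp
  | cons x rest ih =>
    simp only [List.foldl_cons, ih, max_le_iff, List.mem_cons]
    constructor
    · rintro ⟨⟨h1, h2⟩, h3⟩
      exact ⟨h1, fun y hy => hy.elim (fun e => e ▸ h2) (h3 y)⟩
    · rintro ⟨h1, h2⟩
      exact ⟨⟨h1, h2 x (Or.inl rfl)⟩, fun y hy => h2 y (Or.inr hy)⟩

-- per game, B's maxima test equals A's all-sets test
theorem game_cond_eq (sets : List (List (String × Int)))
    (hnd : ∀ s ∈ sets, (s.map Prod.fst).Nodup) :
    (let m := sets.foldl (fun st cube_set => cube_set.foldl updMax st) (0, 0, 0)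
     m.1 ≤ 12 ∧ m.2.1 ≤ 13 ∧ m.2.2 ≤ 14) ↔
    (sets.all (fun cube_set =>
      ([("red", (12 : Int)), ("green", 13), ("blue", 14)] : List (String × Int)).all
        (fun cn => decide (lookupD0 cube_set cn.1 ≤ cn.2))) = true) := by
  rw [show (let m := sets.foldl (fun st cube_set => cube_set.foldl updMax st) (0, 0, 0)
        m.1 ≤ 12 ∧ m.2.1 ≤ 13 ∧ m.2.2 ≤ 14) =
      ((sets.foldl (fun st cube_set => cube_set.foldl updMax st) ((0 : Int), (0 : Int), (0 : Int))).1 ≤ 12 ∧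
       (sets.foldl (fun st cube_set => cube_set.foldl updMax st) ((0 : Int), (0 : Int), (0 : Int))).2.1 ≤ 13 ∧
       (sets.foldl (fun st cube_set => cube_set.foldl updMax st) ((0 : Int), (0 : Int), (0 : Int))).2.2 ≤ 14) from rfl]
  rw [foldl_updMax_sets sets (0, 0, 0) hnd (by norm_num)]
  simp only [foldl_max_le, List.all_eq_true]
  constructor
  · rintro ⟨⟨-, hr⟩, ⟨-, hg⟩, ⟨-, hb⟩⟩ s hs
    simp [hr s hs, hg s hs, hb s hs]
  · intro h
    refine ⟨⟨by norm_num, ?_⟩, ⟨by norm_num, ?_⟩, ⟨by norm_num, ?_⟩⟩ <;>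
      · intro s hs
        have := h s hs
        simp at this
        omega

-- the two outer folds agree from any accumulator
theorem folds_eq (g : List (Int × List (List (String × Int))))
    (hnd : ∀ p ∈ g, ∀ s ∈ p.2, (s.map Prod.fst).Nodup) : ∀ acc : Int,
    g.foldl
      (fun id_sum p =>
        let all_sets_possible :=
          p.2.all (fun cube_set =>
            ([("red", (12 : Int)), ("green", 13), ("blue", 14)] : List (String × Int)).all
              (fun cn => decide (lookupD0 cube_set cn.1 ≤ cn.2)))
        if all_sets_possible then id_sum + p.1 else id_sum) acc =
    g.foldl
      (fun total p =>
        let m := p.2.foldl (fun st cube_set => cube_set.foldl updMax st) (0, 0, 0)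
        if m.1 ≤ 12 ∧ m.2.1 ≤ 13 ∧ m.2.2 ≤ 14 then total + p.1 else total) acc := by
  induction g with
  | nil => intro acc; rfl
  | cons p rest ih =>
    intro acc
    have hc := game_cond_eq p.2 (hnd p (by simp))
    have hrest : ∀ q ∈ rest, ∀ s ∈ q.2, (s.map Prod.fst).Nodup :=
      fun q hq => hnd q (by simp [hq])
    simp only [List.foldl_cons]
    by_cases h : (p.2.all (fun cube_set =>
        ([("red", (12 : Int)), ("green", 13), ("blue", 14)] : List (String × Int)).all
          (fun cn => decide (lookupD0 cube_set cn.1 ≤ cn.2))) = true)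
    · rw [if_pos h, if_pos (hc.mpr h)]
      exact ih hrest _
    · rw [if_neg (by simpa using h), if_neg (fun hb => h (hc.mp hb))]
      exact ih hrest _

-- ===== VERDICT (by name: the statement is the Claim_ definition above) =====
theorem part_one_spec : Claim_equal_part_one := by
  intro g _ hpre
  show part_one g = part_one_alt g
  unfold part_one part_one_alt
  exact folds_eq g hpre.2 0
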